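-- pv_equiv track=rewrite | github.com/paket-core/webserver | encoder.py | baseKdecode
-- ===== SOURCE A (Python) =====
-- alphabet = '123456789ABCDEFGHJKMNPRSTVWXYZ'
--
-- def baseKdecode(val):
--     """Decode a baseK string. Case insensitive."""
--     num = 0;
--     if not isinstance(val, str):
--         raise ValueError(str(val) + " is not a valid string")
--     val = val.upper()
--     for c in val:
--         num *= len(alphabet)
--         try:
--             num += alphabet.index(c)
--         except ValueError:
--             raise ValueError('character \'%s\' is not a valid baseK string' % (c,))
--     return num
-- ===== SOURCE B (Python) =====
-- alphabet = '123456789ABCDEFGHJKMNPRSTVWXYZ'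
--
-- def baseKdecode(val):
--     """Decode a baseK string. Case insensitive."""
--     if not isinstance(val, str):
--         raise ValueError(str(val) + " is not a valid string")
--     digit = {c: i for i, c in enumerate(alphabet)}
--     digits = []
--     for c in val.upper():
--         if c not in digit:
--             raise ValueError('character \'%s\' is not a valid baseK string' % (c,))
--         digits.append(digit[c])
--     num = 0
--     weight = 1
--     for d in reversed(digits):
--         num += d * weight
--         weight *= len(alphabet)
--     return num
-- ===== Notes on version B (the rewrite author's own statement) =====
-- stated objective: alternative
-- what changed: Replaces Horner's running accumulation with try/except around alphabet.index inside one loop by two phases: a precomputed digit dictionary validates and maps the characters left-to-right, then the digit list is accumulated right-to-left by explicit place value (num += d*weight; weight *= base), so the accumulator is never multiplied and no index scan or exception handling occurs per digit.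
import Mathlib
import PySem

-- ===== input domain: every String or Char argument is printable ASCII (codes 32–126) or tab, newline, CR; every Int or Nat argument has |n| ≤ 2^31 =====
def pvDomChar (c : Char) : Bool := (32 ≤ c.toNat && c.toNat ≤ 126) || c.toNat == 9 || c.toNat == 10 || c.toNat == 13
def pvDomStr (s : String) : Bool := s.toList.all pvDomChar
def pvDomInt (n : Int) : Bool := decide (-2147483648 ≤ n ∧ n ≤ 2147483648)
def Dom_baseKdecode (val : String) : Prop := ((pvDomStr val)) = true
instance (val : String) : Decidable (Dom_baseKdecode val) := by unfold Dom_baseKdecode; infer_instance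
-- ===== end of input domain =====

-- B replaces A's Horner accumulation (index scan + try/except per char) by a dict-validated digit list summed right-to-left by place value; same values, different decomposition.

-- ===== PORT A =====
def pvAlphabet : List Char := "123456789ABCDEFGHJKMNPRSTVWXYZ".toList

-- Horner loop: num = num*len(alphabet) + alphabet.index(c).  Where Python raises ValueError
-- (c not in the alphabet) index? is none; Pre_ excludes exactly those inputs (getD 0 is unreachable there).
def baseKdecode (val : String) : Int :=
  (PySem.Chars.upper val.toList).foldl
    (fun num c => num * (pvAlphabet.length : Int) + (((PySem.List.index? pvAlphabet c).getD 0 : Nat) : Int)) 0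

-- ===== PORT B =====
-- Source B's digit table: {c: i for i, c in enumerate(alphabet)}.
def pvDigits : PySem.Dict Char Int :=
  (PySem.List.enumerate pvAlphabet 0).foldl (fun d p => d.insert p.2 p.1) PySem.Dict.empty

-- Source B's two phases: validate left-to-right and map each character to its digit (the
-- 'if c not in digit: raise ValueError' branch is exactly the inputs Pre_ excludes; there
-- digit[c] cannot raise KeyError, so the lookup is getD 0, the default unreachable under Pre_),
-- then accumulate right-to-left over reversed(digits) with num += d * weight; weight *= base.
def baseKdecodeAltGo : Int → Int → List Int → Int
  | num, _, [] => num
  | num, weight, d :: t => baseKdecodeAltGo (num + d * weight) (weight * (pvAlphabet.length : Int)) t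

def baseKdecode_alt (val : String) : Int :=
  let digits := (PySem.Chars.upper val.toList).map (fun c => pvDigits.getD c 0)
  baseKdecodeAltGo 0 1 digits.reverse

-- ===== PRECONDITION & SPEC =====
-- Pre_ excludes exactly the inputs on which Python A raises ValueError: some character of
-- val.upper() is not in the baseK alphabet.
def Pre_baseKdecode (val : String) : Prop :=
  ((PySem.Chars.upper val.toList).all (fun c => pvAlphabet.contains c)) = true
instance (val : String) : Decidable (Pre_baseKdecode val) := by unfold Pre_baseKdecode; infer_instance
def pvWitness_baseKdecode : String := "a1"

def Spec_baseKdecode (val : String) (out : Int) : Prop := out = baseKdecode_alt val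
instance (val : String) (out : Int) : Decidable (Spec_baseKdecode val out) := by unfold Spec_baseKdecode; infer_instance

-- ===== CLAIM (what is proved, stated in full; the proofs are below) =====
def Claim_equal_baseKdecode : Prop := ∀ (val : String), Dom_baseKdecode val → Pre_baseKdecode val → Spec_baseKdecode val (baseKdecode val)

-- ===== LEMMAS AND PROOFS =====
-- The fold-built digit table looks up a character's first index in the (duplicate-free) alphabet.
lemma digits_getD_aux (l : List Char) (hl : l.Nodup) (c : Char) :
    ((PySem.List.enumerate l 0).foldl (fun d p => d.insert p.2 p.1) PySem.Dict.empty).getD c 0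
      = (((PySem.List.index? l c).getD 0 : Nat) : Int) := by
  induction l using List.reverseRecOn with
  | nil => simp [PySem.List.enumerate, PySem.Dict.getD_empty, PySem.List.index?]
  | append_singleton t x ih =>
    have hx : x ∉ t := by simp [List.nodup_append] at hl; tauto
    have ht : t.Nodup := (List.nodup_append.mp hl).1
    rw [PySem.List.enumerate_append]
    simp only [PySem.List.enumerate, List.foldl_append, List.foldl_cons, List.foldl_nil]
    by_cases hc : c = x
    · subst hc
      rw [PySem.Dict.getD_insert_self, PySem.List.index?_append_singleton_self t c hx]
      simp
    · rw [PySem.Dict.getD_insert_of_ne _ _ _ hc, ih ht]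
      by_cases hmem : c ∈ t
      · rw [PySem.List.index?_append_of_mem _ hmem]
      · have h1 : PySem.List.index? t c = none := by
          rw [PySem.List.index?_eq_none_iff]; exact hmem
        have h2 : PySem.List.index? (t ++ [x]) c = none := by
          rw [PySem.List.index?_eq_none_iff]; simp [hmem, hc]
        rw [h1, h2]

lemma pvDigits_getD (c : Char) :
    pvDigits.getD c 0 = (((PySem.List.index? pvAlphabet c).getD 0 : Nat) : Int) :=
  digits_getD_aux pvAlphabet (by decide) c

-- H ds = the base-30 value of the digit list ds (most significant first), the common meaning
-- of both loops.
def pvVal : List Int → Int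
  | [] => 0
  | d :: t => d * (pvAlphabet.length : Int) ^ t.length + pvVal t

lemma pvVal_append (l : List Int) (x : Int) :
    pvVal (l ++ [x]) = pvVal l * (pvAlphabet.length : Int) + x := by
  induction l with
  | nil => simp [pvVal]
  | cons d t ih =>
    simp only [List.cons_append, pvVal, ih, List.length_append, List.length_cons,
      List.length_nil, pow_succ]
    ring

-- B's reversed accumulation computes num + weight * (value of the reversed input).
lemma altGo_eq (l : List Int) : ∀ (num weight : Int),
    baseKdecodeAltGo num weight l = num + pvVal l.reverse * weight := by
  induction l with
  | nil => intro num weight; simp [baseKdecodeAltGo, pvVal]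
  | cons d t ih =>
    intro num weight
    simp only [baseKdecodeAltGo, ih, List.reverse_cons, pvVal_append]
    ring

-- A's Horner fold over the characters computes the same value.
lemma horner_eq_val (l : List Char) : ∀ (a : Int),
    l.foldl (fun num c => num * (pvAlphabet.length : Int) + (((PySem.List.index? pvAlphabet c).getD 0 : Nat) : Int)) a
      = a * (pvAlphabet.length : Int) ^ l.length + pvVal (l.map (fun c => pvDigits.getD c 0)) := by
  induction l with
  | nil => intro a; simp [pvVal]
  | cons c t ih =>
    intro a
    simp only [List.foldl_cons, ih, List.map_cons, pvVal, List.length_map, List.length_cons,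
      pvDigits_getD, pow_succ]
    ring

-- ===== VERDICT (by name: the statement is the Claim_ definition above) =====
theorem baseKdecode_spec : Claim_equal_baseKdecode := by
  intro val _ _
  unfold Spec_baseKdecode baseKdecode baseKdecode_alt
  rw [horner_eq_val _ 0, altGo_eq]
  simp
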